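-- pv_equiv track=rewrite | github.com/hidog123/dns_33_million | addlast.py | expand_pattern
-- ===== SOURCE A (Python) =====
-- from itertools import product
--
-- MAX_EXPAND = 10_000_000  # adjust or set to None
--
-- def expand_pattern(pattern: str, token_lists: dict):
--     """
--     token_lists: dict mapping token -> list_of_strings
--     Return generator yielding expanded strings (pattern with tokens replaced)
--     If no tokens present, yield pattern itself.
--     """
--     # Find tokens present in the pattern (preserve order in which we will substitute)
--     tokens = [tok for tok in token_lists.keys() if tok in pattern]
--     if not tokens:
--         yield pattern
--         return
--
--     lists = [token_lists[t] for t in tokens]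
--     # If any list is empty, expansion yields nothing
--     if any(len(lst) == 0 for lst in lists):
--         return
--
--     # check caps
--     total = 1
--     for lst in lists:
--         total *= len(lst)
--     if MAX_EXPAND is not None and total > MAX_EXPAND:
--         raise RuntimeError(f"Expansion size {total} exceeds MAX_EXPAND ({MAX_EXPAND}). Aborting this pattern.")
--
--     for combo in product(*lists):
--         s = pattern
--         for tok, repl in zip(tokens, combo):
--             s = s.replace(tok, repl)
--         yield s
-- ===== SOURCE B (Python) =====
-- MAX_EXPAND = 10_000_000  # adjust or set to None
--
-- def expand_pattern(pattern: str, token_lists: dict):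
--     """Recursive-generator re-implementation: thread the partially
--     substituted string down the recursion instead of materialising
--     itertools.product combos and re-replacing from the full pattern."""
--     pairs = [(tok, token_lists[tok]) for tok in token_lists if tok in pattern]
--     if not pairs:
--         yield pattern
--         return
--
--     total = 1
--     for _, lst in pairs:
--         total *= len(lst)
--     if total == 0:
--         # some replacement list is empty: expansion yields nothing
--         return
--     if MAX_EXPAND is not None and total > MAX_EXPAND:
--         raise RuntimeError(f"Expansion size {total} exceeds MAX_EXPAND ({MAX_EXPAND}). Aborting this pattern.")
--
--     def rec(i, s):
--         if i == len(pairs):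
--             yield s
--         else:
--             tok, repls = pairs[i]
--             for r in repls:
--                 yield from rec(i + 1, s.replace(tok, r))
--
--     yield from rec(0, pattern)
-- ===== Notes on version B (the rewrite author's own statement) =====
-- stated objective: alternative
-- what changed: Replaced the itertools.product loop that re-replaces every token into the full pattern per combination with a recursive generator rec(i, s) that threads the partially substituted string down the recursion, plus a single total==0 product test instead of the any-empty-list scan.
import Mathlib
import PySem

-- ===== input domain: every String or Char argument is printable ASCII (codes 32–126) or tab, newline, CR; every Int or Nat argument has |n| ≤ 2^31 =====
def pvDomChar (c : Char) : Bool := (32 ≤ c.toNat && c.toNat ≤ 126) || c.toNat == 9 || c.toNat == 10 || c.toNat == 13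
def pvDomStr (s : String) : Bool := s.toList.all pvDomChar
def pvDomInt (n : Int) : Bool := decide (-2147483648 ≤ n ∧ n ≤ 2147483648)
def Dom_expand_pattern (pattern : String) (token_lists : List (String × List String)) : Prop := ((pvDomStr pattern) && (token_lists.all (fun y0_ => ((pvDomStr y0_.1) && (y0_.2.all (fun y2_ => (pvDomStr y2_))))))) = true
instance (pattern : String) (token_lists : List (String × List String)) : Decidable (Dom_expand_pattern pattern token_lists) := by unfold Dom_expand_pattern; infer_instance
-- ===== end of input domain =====

-- B replaces the itertools.product loop (re-replacing each token into the full pattern per combo)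
-- with a recursive generator threading the partially substituted string; alternative decomposition, same cost.

-- shared dict plumbing: dict keys (first occurrences, in order) and dict lookup (first match)
def pvLookup (d : List (String × List String)) (k : String) : List String :=
  (List.lookup k d).getD []

-- ===== PORT A =====
-- itertools.product(*lists), first list varies slowest (Python order)
def pvProd : List (List String) → List (List String)
  | [] => [[]]
  | l :: ls => l.flatMap (fun x => (pvProd ls).map (fun c => x :: c))

def expand_pattern (pattern : String) (token_lists : List (String × List String)) : List String :=
  let tokens := (PySem.List.dedup (token_lists.map Prod.fst)).filter (fun t => PySem.Str.isIn t pattern)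
  if tokens.isEmpty then [pattern]
  else
    let lists := tokens.map (pvLookup token_lists)
    if lists.any (fun l => l.length == 0) then []
    else
      let total : Nat := lists.foldl (fun acc l => acc * l.length) 1
      if total > 10000000 then []   -- Python raises RuntimeError here; excluded by Pre_
      else (pvProd lists).map (fun combo =>
        (tokens.zip combo).foldl (fun s p => PySem.Str.replace s p.1 p.2) pattern)

-- ===== PORT B =====
-- rec(i, s): thread the partially substituted string down the recursion
def pvRec : List (String × List String) → String → List String
  | [], s => [s]
  | (tok, repls) :: rest, s => repls.flatMap (fun r => pvRec rest (PySem.Str.replace s tok r))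

def expand_pattern_alt (pattern : String) (token_lists : List (String × List String)) : List String :=
  let pairs := ((PySem.List.dedup (token_lists.map Prod.fst)).filter (fun t => PySem.Str.isIn t pattern)).map
      (fun t => (t, pvLookup token_lists t))
  if pairs.isEmpty then [pattern]
  else
    let total : Nat := pairs.foldl (fun acc p => acc * p.2.length) 1
    if total == 0 then []
    else if total > 10000000 then []   -- Python raises RuntimeError here; excluded by Pre_
    else pvRec pairs pattern

-- ===== PRECONDITION & SPEC =====
-- Pre_ excludes exactly the inputs on which A (and B) raise RuntimeError: some token occurs in the
-- pattern, no replacement list is empty, and the product of the list lengths exceeds MAX_EXPAND.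
def Pre_expand_pattern (pattern : String) (token_lists : List (String × List String)) : Prop :=
  let tokens := (PySem.List.dedup (token_lists.map Prod.fst)).filter (fun t => PySem.Str.isIn t pattern)
  tokens = [] ∨ (tokens.map (fun t => ((List.lookup t token_lists).getD []).length)).prod ≤ 10000000

instance (pattern : String) (token_lists : List (String × List String)) : Decidable (Pre_expand_pattern pattern token_lists) := by unfold Pre_expand_pattern; infer_instance

def pvWitness_expand_pattern : String × (List (String × List String)) :=
  ("a-X", [("X", ["1", "2"])])

def Spec_expand_pattern (pattern : String) (token_lists : List (String × List String)) (out : List String) : Prop := out = expand_pattern_alt pattern token_lists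
instance (pattern : String) (token_lists : List (String × List String)) (out : List String) : Decidable (Spec_expand_pattern pattern token_lists out) := by unfold Spec_expand_pattern; infer_instance

-- ===== CLAIM (what is proved, stated in full; the proofs are below) =====
def Claim_equal_expand_pattern : Prop := ∀ (pattern : String) (token_lists : List (String × List String)), Dom_expand_pattern pattern token_lists → Pre_expand_pattern pattern token_lists → Spec_expand_pattern pattern token_lists (expand_pattern pattern token_lists)

-- ===== LEMMAS AND PROOFS =====

-- core: the recursive generator enumerates exactly product-then-sequential-replace
theorem pvRec_eq_prod (pairs : List (String × List String)) (s : String) :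
    pvRec pairs s = (pvProd (pairs.map Prod.snd)).map
      (fun combo => ((pairs.map Prod.fst).zip combo).foldl (fun s p => PySem.Str.replace s p.1 p.2) s) := by
  induction pairs generalizing s with
  | nil => simp [pvRec, pvProd]
  | cons hd tl ih =>
    obtain ⟨tok, repls⟩ := hd
    simp only [pvRec, pvProd, List.map_cons, List.map_flatMap, List.map_map, ih]
    congr 1

theorem foldl_mul_len (lists : List (List String)) :
    lists.foldl (fun acc l => acc * l.length) 1 = (lists.map List.length).prod := by
  rw [List.prod_eq_foldl, List.foldl_map]

theorem expand_pattern_eq (pattern : String) (token_lists : List (String × List String))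
    (hpre : Pre_expand_pattern pattern token_lists) :
    expand_pattern pattern token_lists = expand_pattern_alt pattern token_lists := by
  unfold expand_pattern expand_pattern_alt Pre_expand_pattern pvLookup at *
  set tokens := (PySem.List.dedup (token_lists.map Prod.fst)).filter (fun t => PySem.Str.isIn t pattern) with htok
  simp only [List.isEmpty_map]
  by_cases hte : tokens.isEmpty
  · simp [hte]
  · simp only [hte]
    have hfst : (tokens.map (fun t => (t, (List.lookup t token_lists).getD []))).map Prod.fst = tokens := by
      simp [Function.comp_def]
    have hsnd : (tokens.map (fun t => (t, (List.lookup t token_lists).getD []))).map Prod.snd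
        = tokens.map (fun t => (List.lookup t token_lists).getD []) := by
      simp
    have htot : (tokens.map (fun t => (t, (List.lookup t token_lists).getD []))).foldl
          (fun acc p => acc * p.2.length) 1
        = (tokens.map (fun t => (List.lookup t token_lists).getD [])).foldl
          (fun acc l => acc * l.length) 1 := by
      rw [List.foldl_map, List.foldl_map]
    rw [htot, foldl_mul_len, List.map_map]
    have hzero : ((tokens.map (fun t => (List.lookup t token_lists).getD [])).any
          (fun l => l.length == 0)) = true
        ↔ (tokens.map (List.length ∘ fun t => (List.lookup t token_lists).getD [])).prod = 0 := by
      rw [List.prod_eq_zero_iff]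
      simp [List.any_eq_true, Function.comp]
    by_cases hz : ((tokens.map (fun t => (List.lookup t token_lists).getD [])).any
        (fun l => l.length == 0)) = true
    · have h0 := hzero.mp hz
      simp [hz, h0]
    · have h0 : (tokens.map (List.length ∘ fun t => (List.lookup t token_lists).getD [])).prod ≠ 0 := by
        intro h; exact hz (hzero.mpr h)
      have hle : (tokens.map (fun t => ((List.lookup t token_lists).getD []).length)).prod ≤ 10000000 := by
        rcases hpre with h | h
        · exfalso; rw [h] at hte; simp at hte
        · exact h
      have hle' : (tokens.map (List.length ∘ fun t => (List.lookup t token_lists).getD [])).prod ≤ 10000000 := by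
        simpa [Function.comp] using hle
      have hgt : ¬ ((tokens.map (List.length ∘ fun t => (List.lookup t token_lists).getD [])).prod > 10000000) := by
        omega
      simp only [Bool.false_eq_true, if_false, if_neg hz, beq_iff_eq, if_neg h0, if_neg hgt]
      rw [pvRec_eq_prod, hfst, hsnd]

-- ===== VERDICT (by name: the statement is the Claim_ definition above) =====
theorem expand_pattern_spec : Claim_equal_expand_pattern := by
  intro pattern token_lists _ hpre
  unfold Spec_expand_pattern
  exact expand_pattern_eq pattern token_lists hpre
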